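-- pv_equiv track=rewrite | github.com/petchproud/EX_Python | ex21.py | longest_vowel_word
-- ===== SOURCE A (Python) =====
-- def longest_vowel_word(word_list):
--     if not word_list:
--         return None
--
--     new_word = None
--     vowel = "aeiouAEIOU"
--
--     for i in word_list:
--         if i.lower().startswith(tuple(vowel)):
--             if new_word is None or len(i) > len(new_word):
--                 new_word = i
--     return new_word
-- ===== SOURCE B (Python) =====
-- def longest_vowel_word(word_list):
--     for w in sorted(word_list, key=len, reverse=True):
--         if w and w[0].lower() in "aeiou":
--             return w
--     return None
-- ===== Notes on version B (the rewrite author's own statement) =====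
-- stated objective: alternative
-- what changed: Replaces A's single-pass manual running-maximum loop by a stable length-descending sort followed by a scan that returns the first vowel-initial word (Python's stable reverse sort keeps the earliest longest word first, matching A's strict-> tie-breaking).
import Mathlib
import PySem

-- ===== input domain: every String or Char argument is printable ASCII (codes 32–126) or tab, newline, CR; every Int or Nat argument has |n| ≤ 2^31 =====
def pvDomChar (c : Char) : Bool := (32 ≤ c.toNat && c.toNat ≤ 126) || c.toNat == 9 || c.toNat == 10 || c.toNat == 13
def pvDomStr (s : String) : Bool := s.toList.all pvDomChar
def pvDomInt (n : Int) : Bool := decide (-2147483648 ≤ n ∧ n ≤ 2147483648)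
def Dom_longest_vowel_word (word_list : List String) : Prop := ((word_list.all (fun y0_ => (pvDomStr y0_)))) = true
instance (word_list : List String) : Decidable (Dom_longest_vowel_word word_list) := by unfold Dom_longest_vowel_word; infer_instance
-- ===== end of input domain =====

-- B replaces A's fused loop (manual Optional running maximum + 10-way startswith-tuple test)
-- by a stable length-descending sort followed by a scan returning the first vowel-initial word; objective: alternative.


-- ===== PORT A =====
-- the local 'vowel' string of A
def pvVowelA : String := "aeiouAEIOU"
-- i.lower().startswith(tuple(vowel)) : any of the ten one-character prefixes
def pvCondA (i : String) : Bool :=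
  pvVowelA.toList.any (fun v => PySem.Str.startswith (PySem.Str.lower i) (String.ofList [v]))
-- one iteration of A's loop body
def pvStepA (new_word : Option String) (i : String) : Option String :=
  if pvCondA i then
    match new_word with
    | none => some i
    | some m => if PySem.Str.len m < PySem.Str.len i then some i else new_word
  else new_word
def longest_vowel_word (word_list : List String) : Option String :=
  if word_list = [] then
    none
  else
    word_list.foldl pvStepA none

-- ===== PORT B =====
-- the loop's test:  w and w[0].lower() in "aeiou"
def pvCondB (w : String) : Bool :=
  match w.toList with
  | [] => false
  | c :: _ => PySem.Str.isIn (String.ofList [PySem.Chars.lowerChar c]) "aeiou"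
-- 'for w in sorted(word_list, key=len, reverse=True): if …: return w' / 'return None'
def longest_vowel_word_alt (word_list : List String) : Option String :=
  (PySem.List.sorted word_list (fun w => PySem.Str.len w) true).find? pvCondB

-- ===== PRECONDITION & SPEC =====
def Spec_longest_vowel_word (word_list : List String) (out : Option String) : Prop := out = longest_vowel_word_alt word_list
instance (word_list : List String) (out : Option String) : Decidable (Spec_longest_vowel_word word_list out) := by unfold Spec_longest_vowel_word; infer_instance

-- ===== CLAIM (what is proved, stated in full; the proofs are below) =====
def Claim_equal_longest_vowel_word : Prop := ∀ (word_list : List String), Dom_longest_vowel_word word_list → Spec_longest_vowel_word word_list (longest_vowel_word word_list)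

-- ===== LEMMAS AND PROOFS =====

theorem toNat_ofNat_valid (n : Nat) (h : Nat.isValidChar n) : (Char.ofNat n).toNat = n := by
  unfold Char.ofNat; rw [dif_pos h]; rfl

-- lowering a character never yields an uppercase vowel
theorem lowerChar_not_upper_vowel (c : Char) :
    PySem.Chars.lowerChar c ∉ (['A','E','I','O','U'] : List Char) := by
  simp only [PySem.Chars.lowerChar, PySem.Chars.isupper]
  split_ifs with h
  · simp only [Bool.and_eq_true, decide_eq_true_eq, Char.le_def] at h
    obtain ⟨h1, h2⟩ := h
    change (65:Nat) ≤ c.toNat at h1; change c.toNat ≤ (90:Nat) at h2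
    have hval : Nat.isValidChar (c.toNat + 32) := Or.inl (by omega)
    have ht := toNat_ofNat_valid (c.toNat + 32) hval
    simp only [List.mem_cons, List.not_mem_nil, or_false, not_or]
    refine ⟨?_,?_,?_,?_,?_⟩ <;> (intro he; rw [he] at ht; simp only [Char.reduceToNat] at ht; omega)
  · intro hm
    apply h
    fin_cases hm <;> decide

-- equality of 'x equals one of the ten vowels' with 'x occurs in "aeiou"', for x not an uppercase vowel
theorem vowel_any_eq_isIn (x : Char) (hne : x ∉ (['A','E','I','O','U'] : List Char)) :
    (("aeiouAEIOU":String).toList.any (fun v => v == x))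
      = PySem.Chars.isIn [x] ("aeiou":String).toList := by
  by_cases hx : x ∈ ("aeiou":String).toList
  · rcases (show x='a' ∨ x='e' ∨ x='i' ∨ x='o' ∨ x='u' by simpa using hx) with rfl|rfl|rfl|rfl|rfl <;> decide
  · have h1 : (("aeiouAEIOU":String).toList.any (fun v => v == x)) = false := by
      simp only [List.any_eq_false]
      intro v hv
      simp only [beq_iff_eq]
      intro he
      subst he
      rcases (show v='a'∨v='e'∨v='i'∨v='o'∨v='u'∨v='A'∨v='E'∨v='I'∨v='O'∨v='U' by simpa using hv) with
        rfl|rfl|rfl|rfl|rfl|rfl|rfl|rfl|rfl|rfl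
      all_goals first
        | exact hx (by decide)
        | exact hne (by decide)
    have h2 : PySem.Chars.isIn [x] ("aeiou":String).toList = false := by
      rw [Bool.eq_false_iff]
      intro hi
      have := (PySem.Chars.isIn_iff_infix [x] _).mp hi
      exact hx ((List.singleton_infix_iff x _).mp this)
    rw [h1, h2]

-- A's vowel test equals B's vowel test on every string
theorem cond_eq (w : String) : pvCondA w = pvCondB w := by
  unfold pvCondA pvCondB pvVowelA
  cases hw : w.toList with
  | nil =>
      have hl : (PySem.Str.lower w).toList = [] := by rw [PySem.Str.toList_lower, hw]; rfl
      simp [PySem.Str.startswith_eq, PySem.Chars.startswith, hl]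
  | cons c t =>
      have hl : (PySem.Str.lower w).toList = PySem.Chars.lowerChar c :: PySem.Chars.lower t := by
        rw [PySem.Str.toList_lower, hw]; rfl
      have hpre : ∀ v : Char,
          PySem.Str.startswith (PySem.Str.lower w) (String.ofList [v]) = (v == PySem.Chars.lowerChar c) := by
        intro v
        rw [PySem.Str.startswith_eq, hl, String.toList_ofList]
        simp [PySem.Chars.startswith, List.isPrefixOf]
      simp only [hpre]
      rw [vowel_any_eq_isIn (PySem.Chars.lowerChar c) (lowerChar_not_upper_vowel c)]
      simp [PySem.Str.isIn]

-- scanning the descending-sorted list after inserting x = one more step of A's running maximum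
theorem find?_insertBy (p : String → Bool) (x : String) (S : List String)
    (hS : S.Pairwise (fun a b => PySem.Str.len b ≤ PySem.Str.len a)) :
    (PySem.List.insertBy (fun a b => decide (PySem.Str.len b < PySem.Str.len a)) x S).find? p
      = (if p x then
           match S.find? p with
           | none => some x
           | some m => if PySem.Str.len m < PySem.Str.len x then some x else some m
         else S.find? p) := by
  induction S with
  | nil =>
      by_cases hpx : p x <;> simp [PySem.List.insertBy, List.find?, hpx]
  | cons y ys ih =>
      have hpw := (List.pairwise_cons.mp hS).1
      have htail := (List.pairwise_cons.mp hS).2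
      simp only [PySem.List.insertBy]
      by_cases hxy : PySem.Str.len y < PySem.Str.len x
      · rw [if_pos (by simpa using hxy)]
        by_cases hpx : p x
        · rw [List.find?_cons_of_pos hpx, if_pos hpx]
          cases hf : (y :: ys).find? p with
          | none => rfl
          | some m =>
              have hm : m ∈ y :: ys := List.mem_of_find?_eq_some hf
              have hlen : PySem.Str.len m ≤ PySem.Str.len y := by
                rcases List.mem_cons.mp hm with rfl | hm'
                · exact le_refl _
                · exact hpw m hm'
              have hlt : PySem.Str.len m < PySem.Str.len x := by omega
              show some x = if PySem.Str.len m < PySem.Str.len x then some x else some m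
              rw [if_pos hlt]
        · rw [List.find?_cons_of_neg (by simpa using hpx), if_neg (by simpa using hpx)]
      · rw [if_neg (by simpa using hxy)]
        by_cases hpy : p y
        · rw [List.find?_cons_of_pos hpy, List.find?_cons_of_pos hpy]
          by_cases hpx : p x
          · rw [if_pos hpx]
            show some y = if PySem.Str.len y < PySem.Str.len x then some x else some y
            rw [if_neg hxy]
          · rw [if_neg (by simpa using hpx)]
        · rw [List.find?_cons_of_neg (by simpa using hpy),
              List.find?_cons_of_neg (by simpa using hpy), ih htail]

-- scanning the whole descending stable sort = A's left fold with its running maximum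
theorem find?_sorted_eq_foldl (xs : List String) :
    (PySem.List.sorted xs (fun w => PySem.Str.len w) true).find? pvCondB
      = xs.foldl pvStepA none := by
  induction xs using List.reverseRecOn with
  | nil => rfl
  | append_singleton ys x ih =>
      have hsort : PySem.List.sorted (ys ++ [x]) (fun w => PySem.Str.len w) true
          = PySem.List.insertBy (fun a b => decide (PySem.Str.len b < PySem.Str.len a)) x
              (PySem.List.sorted ys (fun w => PySem.Str.len w) true) := by
        rw [PySem.List.sorted_rev_eq_foldl_insertBy, PySem.List.sorted_rev_eq_foldl_insertBy,
            List.foldl_append]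
        rfl
      have hpw : (PySem.List.sorted ys (fun w => PySem.Str.len w) true).Pairwise
          (fun a b => PySem.Str.len b ≤ PySem.Str.len a) :=
        PySem.List.sorted_pairwise_rev ys (fun w => PySem.Str.len w)
      rw [hsort, find?_insertBy pvCondB x _ hpw, ih, List.foldl_append]
      simp only [List.foldl_cons, List.foldl_nil]
      generalize ys.foldl pvStepA none = acc
      show _ = pvStepA acc x
      unfold pvStepA
      rw [cond_eq x]
      cases acc with
      | none => rfl
      | some m => by_cases h : PySem.Str.len m < PySem.Str.len x <;> rfl

-- ===== VERDICT (by name: the statement is the Claim_ definition above) =====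
theorem longest_vowel_word_spec : Claim_equal_longest_vowel_word := by
  intro wl _
  unfold Spec_longest_vowel_word longest_vowel_word longest_vowel_word_alt
  rw [find?_sorted_eq_foldl]
  split_ifs with h
  · subst h; rfl
  · rfl
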